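-- pv_equiv track=rewrite | github.com/ywoogi/http_server-client | client.py | get_directories
-- ===== SOURCE A (Python) =====
-- def get_directories(path):
--     # Get all the needed directories for specified file
--     # Example: local/images/image.png returns [local, local/images]
--     split = path.strip("/").split("/")
--     dirs = []
--     if len(split) == 1:
--         return dirs
--     cur = split[0]
--     dirs.append(cur)
--     for i in range(1,len(split)-1):
--         cur = "/".join([cur,split[i]])
--         dirs.append(cur)
--     return dirs
-- ===== SOURCE B (Python) =====
-- def get_directories(path):
--     split = path.strip("/").split("/")
--     return ["/".join(split[:i]) for i in range(1, len(split))]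
-- ===== Notes on version B (the rewrite author's own statement) =====
-- stated objective: simpler
-- what changed: B builds each directory prefix independently by joining a slice split[:i], eliminating A's running accumulator `cur`, the explicit length-1 guard and the separate first-element append.
import Mathlib
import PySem

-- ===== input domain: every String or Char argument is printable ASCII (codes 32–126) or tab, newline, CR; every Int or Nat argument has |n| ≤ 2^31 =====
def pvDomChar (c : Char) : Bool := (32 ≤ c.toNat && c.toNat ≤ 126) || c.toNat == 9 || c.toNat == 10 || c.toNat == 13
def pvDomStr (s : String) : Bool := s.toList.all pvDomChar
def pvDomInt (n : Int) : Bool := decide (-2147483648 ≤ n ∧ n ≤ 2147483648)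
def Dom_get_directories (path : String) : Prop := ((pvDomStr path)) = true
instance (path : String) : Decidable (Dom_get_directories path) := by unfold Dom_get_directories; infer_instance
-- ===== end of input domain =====

-- B builds each directory prefix independently by joining the slice split[:i], replacing A's running
-- accumulator `cur`, its length-1 guard and the separate first append (objective: simpler).


-- ===== PORT A =====
-- path.strip("/").split("/"): the separator "/" is nonempty, so split? never returns none;
-- the none branch is unreachable (proved below) and returns a dummy value.
def get_directories (path : String) : List String :=
  match PySem.Str.split? (PySem.Str.stripChars path "/") "/" with
  | none => []
  | some split =>
    if split.length == 1 then []
    else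
      let cur := PySem.List.pyGetD split 0 ""
      let res := (PySem.List.pyRange 1 ((split.length : Int) - 1) 1).foldl
        (fun (st : String × List String) i =>
          let c := PySem.Str.join "/" [st.1, PySem.List.pyGetD split i ""]
          (c, st.2 ++ [c])) (cur, [cur])
      res.2

-- ===== PORT B =====
def get_directories_alt (path : String) : List String :=
  match PySem.Str.split? (PySem.Str.stripChars path "/") "/" with
  | none => []
  | some split =>
    (PySem.List.pyRange 1 (split.length : Int) 1).map
      (fun i => PySem.Str.join "/" (PySem.List.slice split none (some i)))

-- ===== PRECONDITION & SPEC =====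
def Spec_get_directories (path : String) (out : List String) : Prop := out = get_directories_alt path
instance (path : String) (out : List String) : Decidable (Spec_get_directories path out) := by unfold Spec_get_directories; infer_instance

-- ===== CLAIM (what is proved, stated in full; the proofs are below) =====
def Claim_equal_get_directories : Prop := ∀ (path : String), Dom_get_directories path → Spec_get_directories path (get_directories path)

-- ===== LEMMAS AND PROOFS =====

-- splitOn.go never returns the empty list (both base cases cons onto acc before reversing)
lemma splitOn_go_ne_nil (sep : List Char) (fuel : Nat) (l cur : List Char)
    (acc : List (List Char)) : PySem.Chars.splitOn.go sep fuel l cur acc ≠ [] := by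
  induction fuel generalizing l cur acc with
  | zero => simp [PySem.Chars.splitOn.go]
  | succ fuel ih =>
    cases l with
    | nil => simp [PySem.Chars.splitOn.go]
    | cons c rest =>
      rw [PySem.Chars.splitOn.go]
      split
      · exact ih _ _ _
      · exact ih _ _ _

lemma splitOn_ne_nil (s sep : List Char) : PySem.Chars.splitOn s sep ≠ [] :=
  splitOn_go_ne_nil sep _ s [] []

-- splitting on the literal "/" always succeeds ("/" is nonempty)
lemma split_slash (s : String) :
    PySem.Str.split? s "/" = some ((PySem.Chars.splitOn s.toList ['/']).map String.ofList) := by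
  have h : "/".toList = ['/'] := rfl
  simp [PySem.Str.split?, PySem.Chars.split?, h]

-- Chars.join over a snoc, for a nonempty prefix list
lemma join_snoc (sep y : List Char) (xs : List (List Char)) (h : xs ≠ []) :
    PySem.Chars.join sep (xs ++ [y]) = PySem.Chars.join sep xs ++ sep ++ y := by
  induction xs with
  | nil => exact absurd rfl h
  | cons a xs ih =>
    cases xs with
    | nil => simp [PySem.Chars.join_cons_cons, PySem.Chars.join_singleton]
    | cons b xs =>
      have ihh := ih (by simp)
      simp only [List.cons_append] at ihh ⊢
      rw [PySem.Chars.join_cons_cons, PySem.Chars.join_cons_cons, ihh]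
      simp

-- the i-th directory prefix: "/".join(split[:i])
def pvPrefix (split : List String) (j : Nat) : String :=
  PySem.Str.join "/" (split.take j)

lemma pvPrefix_succ (split : List String) (j : Nat) (h1 : 1 ≤ j) (h2 : j < split.length) :
    PySem.Str.join "/" [pvPrefix split j, split.getD j ""] = pvPrefix split (j + 1) := by
  apply String.toList_inj.mp
  rw [List.getD_eq_getElem split "" h2]
  simp only [pvPrefix, PySem.Str.toList_join, List.map_cons, List.map_nil,
    List.take_succ_eq_append_getElem h2, List.map_append]
  rw [join_snoc _ _ _ (List.ne_nil_of_length_pos (by simp only [List.length_map, List.length_take]; omega))]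
  rw [PySem.Chars.join_cons_cons, PySem.Chars.join_singleton]

-- pyRange with bounds 1 and a natural upper end, as a mapped List.range'
lemma pyRange_natCast (a b : Nat) :
    PySem.List.pyRange (a : Int) (b : Int) 1
      = (List.range' a (b - a)).map (fun (j : Nat) => (j : Int)) := by
  by_cases hab : a < b
  · obtain ⟨m, hm⟩ : ∃ m, b - a = m := ⟨b - a, rfl⟩
    rw [hm]
    induction m generalizing a with
    | zero => omega
    | succ m ih =>
      rw [PySem.List.pyRange_one_cons (by exact_mod_cast hab), List.range'_succ, List.map_cons]
      by_cases hab' : a + 1 < b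
      · have hc : (a : Int) + 1 = ((a + 1 : Nat) : Int) := by push_cast; ring
        rw [hc, ih (a + 1) hab' (by omega)]
      · have hb : b = a + 1 := by omega
        have hm0 : m = 0 := by omega
        subst hb hm0
        simp [PySem.List.pyRange]
  · have h0 : b - a = 0 := by omega
    rw [h0]
    simp [PySem.List.pyRange]
    intro h
    omega

lemma pyRange_one (b : Nat) :
    PySem.List.pyRange 1 (b : Int) 1
      = (List.range' 1 (b - 1)).map (fun (j : Nat) => (j : Int)) := by
  have h := pyRange_natCast 1 b
  simpa using h

-- loop invariant for A's fold: starting from prefix k, the fold appends prefixes k+1, …, k+m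
lemma foldA_loop (split : List String) (m : Nat) :
    ∀ (k : Nat) (acc : List String), 1 ≤ k → k + m ≤ split.length →
    ((List.range' k m).map (fun (j : Nat) => (j : Int))).foldl
      (fun (st : String × List String) i =>
        let c := PySem.Str.join "/" [st.1, PySem.List.pyGetD split i ""]
        (c, st.2 ++ [c])) (pvPrefix split k, acc)
    = (pvPrefix split (k + m), acc ++ (List.range' (k + 1) m).map (pvPrefix split)) := by
  induction m with
  | zero => intro k acc _ _; simp
  | succ m ih =>
    intro k acc hk hkm
    rw [List.range'_succ, List.map_cons, List.foldl_cons]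
    simp only [PySem.List.pyGetD_natCast]
    rw [pvPrefix_succ split k hk (by omega)]
    rw [ih (k + 1) (acc ++ [pvPrefix split (k + 1)]) (by omega) (by omega)]
    have hs : k + 1 + m = k + (m + 1) := by omega
    rw [hs, List.range'_succ]
    simp

-- the core equivalence, for any nonempty split list
lemma core_eq (split : List String) (hne : split ≠ []) :
    (if split.length == 1 then []
     else
       let cur := PySem.List.pyGetD split 0 ""
       let res := (PySem.List.pyRange 1 ((split.length : Int) - 1) 1).foldl
         (fun (st : String × List String) i =>
           let c := PySem.Str.join "/" [st.1, PySem.List.pyGetD split i ""]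
           (c, st.2 ++ [c])) (cur, [cur])
       res.2)
    = (PySem.List.pyRange 1 (split.length : Int) 1).map
        (fun i => PySem.Str.join "/" (PySem.List.slice split none (some i))) := by
  have hlen : 1 ≤ split.length := List.length_pos_of_ne_nil hne
  rw [pyRange_one split.length, List.map_map]
  have hB : ((fun i => PySem.Str.join "/" (PySem.List.slice split none (some i))) ∘
      (fun (j : Nat) => (j : Int))) = pvPrefix split := by
    funext j
    simp only [Function.comp, PySem.List.slice_to_natCast]
    rfl
  rw [hB]
  by_cases h1 : split.length = 1
  · simp [h1]
  · have hlen2 : 2 ≤ split.length := by omega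
    simp only [beq_iff_eq, h1, if_false]
    have hcur : PySem.List.pyGetD split 0 "" = pvPrefix split 1 := by
      have h0 : (0 : Int) = ((0 : Nat) : Int) := rfl
      rw [h0, PySem.List.pyGetD_natCast]
      apply String.toList_inj.mp
      rw [List.getD_eq_getElem split "" (by omega)]
      simp [pvPrefix, PySem.Str.toList_join,
        List.take_succ_eq_append_getElem (by omega : 0 < split.length),
        PySem.Chars.join_singleton]
    have hcast : ((split.length : Int) - 1) = ((split.length - 1 : Nat) : Int) := by
      push_cast [hlen]; ring
    rw [hcur, hcast, pyRange_one (split.length - 1)]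
    rw [foldA_loop split (split.length - 1 - 1) 1 [pvPrefix split 1] (by omega) (by omega)]
    have hr : List.range' 1 (split.length - 1) = 1 :: List.range' 2 (split.length - 1 - 1) := by
      obtain ⟨d, hd⟩ : ∃ d, split.length - 1 - 1 = d := ⟨_, rfl⟩
      rw [hd, show split.length - 1 = d + 1 by omega, List.range'_succ]
    rw [hr, List.map_cons]
    simp

-- ===== VERDICT (by name: the statement is the Claim_ definition above) =====
theorem get_directories_spec : Claim_equal_get_directories := by
  intro path _
  unfold Spec_get_directories get_directories get_directories_alt
  rw [split_slash]
  apply core_eq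
  simp only [ne_eq, List.map_eq_nil_iff]
  exact splitOn_ne_nil _ _
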